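-- pv_equiv track=rewrite | github.com/TeoSanch/ml_realbook | chord_distance_octave.py | cost_count
-- ===== SOURCE A (Python) =====
-- def cost_count(suite,L_cost,R_cost,P_cost):
--     cost = 0
--     for i in suite:
--         if i=='L':
--             cost = cost+L_cost
--         elif i=='R':
--             cost = cost+R_cost
--         elif i=='P':
--             cost=cost+P_cost
--
--     return cost
-- ===== SOURCE B (Python) =====
-- def cost_count(suite, L_cost, R_cost, P_cost):
--     # Divide-and-conquer: cost of a segment = cost(left half) + cost(right half).
--     def go(lo, hi):
--         n = hi - lo
--         if n == 0:
--             return 0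
--         if n == 1:
--             c = suite[lo]
--             return L_cost if c == 'L' else R_cost if c == 'R' else P_cost if c == 'P' else 0
--         mid = lo + n // 2
--         return go(lo, mid) + go(mid, hi)
--     return go(0, len(suite))
-- ===== Notes on version B (the rewrite author's own statement) =====
-- stated objective: alternative
-- what changed: Replaced the linear branch-per-element accumulation loop with a divide-and-conquer recursion: the cost of a segment is computed as the sum of the costs of its two halves, with a per-character base case; correct because the cost sum is associative over concatenation.
import Mathlib
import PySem

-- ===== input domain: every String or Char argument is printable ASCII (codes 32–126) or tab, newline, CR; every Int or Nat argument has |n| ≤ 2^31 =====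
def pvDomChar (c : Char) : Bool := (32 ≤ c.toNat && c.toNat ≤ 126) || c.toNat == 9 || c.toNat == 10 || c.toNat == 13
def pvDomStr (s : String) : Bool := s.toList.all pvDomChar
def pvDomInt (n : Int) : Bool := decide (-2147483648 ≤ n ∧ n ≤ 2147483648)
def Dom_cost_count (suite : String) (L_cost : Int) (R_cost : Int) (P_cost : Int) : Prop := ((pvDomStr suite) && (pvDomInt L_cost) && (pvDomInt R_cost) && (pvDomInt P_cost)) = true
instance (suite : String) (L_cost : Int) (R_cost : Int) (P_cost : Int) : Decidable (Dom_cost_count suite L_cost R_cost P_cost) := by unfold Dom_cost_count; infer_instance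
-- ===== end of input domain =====

-- B replaces A's linear branch-per-element accumulation with a divide-and-conquer
-- recursion (segment cost = cost of left half + cost of right half); alternative, same cost.

-- ===== PORT A =====
def cost_count (suite : String) (L_cost : Int) (R_cost : Int) (P_cost : Int) : Int :=
  suite.toList.foldl (fun cost i =>
    if i == 'L' then cost + L_cost
    else if i == 'R' then cost + R_cost
    else if i == 'P' then cost + P_cost
    else cost) 0

-- ===== PORT B =====
-- Source B's go(lo, hi) works on the segment suite[lo:hi]; here the segment is the list
-- itself, and a fuel argument (initially the length) makes the halving recursion structural.
def ccGo (L_cost R_cost P_cost : Int) (fuel : Nat) (l : List Char) : Int :=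
  match l with
  | [] => 0
  | [c] => if c == 'L' then L_cost else if c == 'R' then R_cost else if c == 'P' then P_cost else 0
  | a :: b :: rest =>
      match fuel with
      | 0 => 0  -- unreachable: fuel starts at the list length
      | fuel + 1 =>
          ccGo L_cost R_cost P_cost fuel ((a :: b :: rest).take ((a :: b :: rest).length / 2)) +
          ccGo L_cost R_cost P_cost fuel ((a :: b :: rest).drop ((a :: b :: rest).length / 2))

def cost_count_alt (suite : String) (L_cost : Int) (R_cost : Int) (P_cost : Int) : Int :=
  ccGo L_cost R_cost P_cost suite.toList.length suite.toList

-- ===== PRECONDITION & SPEC =====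
def Spec_cost_count (suite : String) (L_cost : Int) (R_cost : Int) (P_cost : Int) (out : Int) : Prop := out = cost_count_alt suite L_cost R_cost P_cost
instance (suite : String) (L_cost : Int) (R_cost : Int) (P_cost : Int) (out : Int) : Decidable (Spec_cost_count suite L_cost R_cost P_cost out) := by unfold Spec_cost_count; infer_instance

-- ===== CLAIM (what is proved, stated in full; the proofs are below) =====
def Claim_equal_cost_count : Prop := ∀ (suite : String) (L_cost : Int) (R_cost : Int) (P_cost : Int), Dom_cost_count suite L_cost R_cost P_cost → Spec_cost_count suite L_cost R_cost P_cost (cost_count suite L_cost R_cost P_cost)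

-- ===== LEMMAS AND PROOFS =====
theorem ccGo_eq_counts (L R P : Int) (fuel : Nat) (l : List Char) (h : l.length ≤ fuel) :
    ccGo L R P fuel l = (l.count 'L' : Int) * L + (l.count 'R' : Int) * R + (l.count 'P' : Int) * P := by
  induction fuel generalizing l with
  | zero =>
      match l with
      | [] => simp [ccGo]
      | [c] => simp at h
      | a :: b :: rest => simp at h
  | succ fuel ih =>
      match l with
      | [] => simp [ccGo]
      | [c] =>
          by_cases hL : c = 'L' <;> by_cases hR : c = 'R' <;> by_cases hP : c = 'P' <;>
            simp [ccGo, hL, hR, hP]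
      | a :: b :: rest =>
          have hlen : (a :: b :: rest).length = rest.length + 2 := by simp
          have h1 : ((a :: b :: rest).take ((a :: b :: rest).length / 2)).length ≤ fuel := by
            simp only [List.length_take, List.length_cons] at *
            omega
          have h2 : ((a :: b :: rest).drop ((a :: b :: rest).length / 2)).length ≤ fuel := by
            simp only [List.length_drop, List.length_cons] at *
            omega
          rw [show ccGo L R P (fuel + 1) (a :: b :: rest) =
              ccGo L R P fuel ((a :: b :: rest).take ((a :: b :: rest).length / 2)) +
              ccGo L R P fuel ((a :: b :: rest).drop ((a :: b :: rest).length / 2)) from rfl]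
          rw [ih _ h1, ih _ h2]
          have hsplit : (a :: b :: rest).take ((a :: b :: rest).length / 2) ++
              (a :: b :: rest).drop ((a :: b :: rest).length / 2) = a :: b :: rest :=
            List.take_append_drop _ _
          have hc : ∀ x : Char, List.count x (a :: b :: rest) =
              List.count x ((a :: b :: rest).take ((a :: b :: rest).length / 2)) +
              List.count x ((a :: b :: rest).drop ((a :: b :: rest).length / 2)) := by
            intro x
            conv_lhs => rw [← hsplit]
            rw [List.count_append]
          rw [hc 'L', hc 'R', hc 'P']
          push_cast
          ring

theorem cost_count_foldl (L R P acc : Int) (l : List Char) :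
    l.foldl (fun cost i =>
      if i == 'L' then cost + L
      else if i == 'R' then cost + R
      else if i == 'P' then cost + P
      else cost) acc
    = acc + (l.count 'L' : Int) * L + (l.count 'R' : Int) * R + (l.count 'P' : Int) * P := by
  induction l generalizing acc with
  | nil => simp
  | cons x xs ih =>
    simp only [List.foldl_cons, ih, List.count_cons]
    by_cases hL : x = 'L' <;> by_cases hR : x = 'R' <;> by_cases hP : x = 'P' <;>
      simp [hL, hR, hP] <;> ring

-- ===== VERDICT (by name: the statement is the Claim_ definition above) =====
theorem cost_count_spec : Claim_equal_cost_count := by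
  intro suite L R P _
  unfold Spec_cost_count cost_count cost_count_alt
  rw [cost_count_foldl, ccGo_eq_counts _ _ _ _ _ (le_refl _)]
  ring
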